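-- pv_equiv track=rewrite | github.com/K-Wu/FlashTrain | third_party/customized_scripts/analyze_log.py | get_canonicalize_key_from
-- ===== SOURCE A (Python) =====
-- ARGS_NAME_FROM_FILENAME_ORDERED = [
--     "model",
--     "hidden_size",
--     "num_layers",
--     "micro_batch_size",
--     "activation_checkpoint",
--     "use_tensor_cache",
--     "disable_adaptive_keep",
--     "disable_adaptive_keep_passive",
--     "seq_length",
--     "num_attention_heads",
--     "global_batch_size",
--     "tc_logging_level",
-- ]
--
-- def get_canonicalize_key_from(
--     args: dict[str, str], result_name: str
-- ) -> tuple[str, ...]: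
--     # Order the args according to ARGS_NAME_FROM_FILENAME_ORDERED. If not found, append to the end alphabetically. Finally append the result_name.
--     result_list = []
--     for argname in ARGS_NAME_FROM_FILENAME_ORDERED:
--         if argname in args:
--             result_list.append(argname + "." + args[argname])
--     for argname in sorted(args.keys()):
--         if argname not in ARGS_NAME_FROM_FILENAME_ORDERED:
--             result_list.append(argname + "." + args[argname])
--     result_list.append(result_name)
--     return tuple(result_list)
-- ===== SOURCE B (Python) =====
-- ARGS_NAME_FROM_FILENAME_ORDERED = [
--     "model",
--     "hidden_size",
--     "num_layers",
--     "micro_batch_size",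
--     "activation_checkpoint",
--     "use_tensor_cache",
--     "disable_adaptive_keep",
--     "disable_adaptive_keep_passive",
--     "seq_length",
--     "num_attention_heads",
--     "global_batch_size",
--     "tc_logging_level",
-- ]
--
--
-- def get_canonicalize_key_from(
--     args: dict[str, str], result_name: str
-- ) -> tuple[str, ...]:
--     # One sort with a composite key: ordered names by their fixed rank, the rest
--     # after them alphabetically; then a single formatting pass.
--     rank = {name: i for i, name in enumerate(ARGS_NAME_FROM_FILENAME_ORDERED)}
--     n = len(rank)
--     keys = sorted(args, key=lambda k: (rank.get(k, n), k))
--     return tuple(k + "." + args[k] for k in keys) + (result_name,)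
-- ===== Notes on version B (the rewrite author's own statement) =====
-- stated objective: simpler
-- what changed: Replaced A's two build passes (a scan of the fixed name list, then a filtered scan of the alphabetically sorted keys) by one sort of the keys under a composite (rank, name) key built from a precomputed rank dict, followed by a single formatting pass.
import Mathlib
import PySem

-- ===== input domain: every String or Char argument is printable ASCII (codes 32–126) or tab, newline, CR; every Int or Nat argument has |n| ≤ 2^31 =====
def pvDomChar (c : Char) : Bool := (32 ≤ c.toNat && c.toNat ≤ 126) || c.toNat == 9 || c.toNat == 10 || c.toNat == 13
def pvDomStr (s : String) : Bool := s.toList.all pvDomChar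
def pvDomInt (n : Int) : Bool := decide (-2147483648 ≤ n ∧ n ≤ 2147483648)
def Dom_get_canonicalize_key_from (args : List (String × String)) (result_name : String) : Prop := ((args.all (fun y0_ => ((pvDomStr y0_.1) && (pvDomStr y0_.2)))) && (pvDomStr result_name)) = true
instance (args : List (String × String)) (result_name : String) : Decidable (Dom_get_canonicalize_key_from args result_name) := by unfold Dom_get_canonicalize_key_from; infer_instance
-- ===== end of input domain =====

-- B replaces A's two build passes (fixed-order scan, then a filtered scan of the sorted
-- keys) by ONE sort of the keys under a composite rank key and a single formatting pass
-- (objective: simpler).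

def ARGS_NAME_FROM_FILENAME_ORDERED : List String := [
  "model",
  "hidden_size",
  "num_layers",
  "micro_batch_size",
  "activation_checkpoint",
  "use_tensor_cache",
  "disable_adaptive_keep",
  "disable_adaptive_keep_passive",
  "seq_length",
  "num_attention_heads",
  "global_batch_size",
  "tc_logging_level"]

-- ===== PORT A =====
-- args[argname] is ported as getD with default "": exact, because every access is
-- guarded by membership of argname in the dict.
def get_canonicalize_key_from (args : List (String × String)) (result_name : String) : List String :=
  let d : PySem.Dict String String := PySem.Dict.ofList args
  let result_list : List String :=
    ARGS_NAME_FROM_FILENAME_ORDERED.foldl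
      (fun acc argname =>
        if d.contains argname then acc ++ [argname ++ "." ++ d.getD argname ""] else acc) []
  let result_list :=
    (PySem.List.sorted d.keys (fun k => k)).foldl
      (fun acc argname =>
        if !ARGS_NAME_FROM_FILENAME_ORDERED.contains argname then
          acc ++ [argname ++ "." ++ d.getD argname ""]
        else acc) result_list
  result_list ++ [result_name]

-- ===== PORT B =====
-- args[k] is ported as getD with default "": exact, because k ranges over the dict's keys.
def get_canonicalize_key_from_alt (args : List (String × String)) (result_name : String) : List String :=
  let d : PySem.Dict String String := PySem.Dict.ofList args
  let rank : PySem.Dict String Int :=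
    (PySem.List.enumerate ARGS_NAME_FROM_FILENAME_ORDERED).foldl
      (fun r p => r.insert p.2 p.1) PySem.Dict.empty
  let n : Int := rank.size
  let keys := PySem.List.sorted2 d.keys (fun k => rank.getD k n) (fun k => k)
  keys.map (fun k => k ++ "." ++ d.getD k "") ++ [result_name]

-- ===== PRECONDITION & SPEC =====
def Spec_get_canonicalize_key_from (args : List (String × String)) (result_name : String) (out : List String) : Prop := out = get_canonicalize_key_from_alt args result_name
instance (args : List (String × String)) (result_name : String) (out : List String) : Decidable (Spec_get_canonicalize_key_from args result_name out) := by unfold Spec_get_canonicalize_key_from; infer_instance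

-- ===== CLAIM (what is proved, stated in full; the proofs are below) =====
def Claim_equal_get_canonicalize_key_from : Prop := ∀ (args : List (String × String)) (result_name : String), Dom_get_canonicalize_key_from args result_name → Spec_get_canonicalize_key_from args result_name (get_canonicalize_key_from args result_name)

-- ===== LEMMAS AND PROOFS =====

-- The lex comparator of sorted2 is the toLex-key comparator of sorted.
theorem sorted2_eq_sorted_toLex {α κ₁ κ₂ : Type} [LinearOrder κ₁] [LinearOrder κ₂]
    (xs : List α) (k1 : α → κ₁) (k2 : α → κ₂) :
    PySem.List.sorted2 xs k1 k2 =
      PySem.List.sorted xs (fun a => (toLex (k1 a, k2 a) : κ₁ ×ₗ κ₂)) := by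
  have hC : (fun a b => decide (k1 a < k1 b) || (!decide (k1 b < k1 a) && decide (k2 a < k2 b)))
      = (fun a b => decide ((toLex (k1 a, k2 a) : κ₁ ×ₗ κ₂) < toLex (k1 b, k2 b))) := by
    funext a b
    rcases lt_trichotomy (k1 a) (k1 b) with h | h | h
    · simp [Prod.Lex.lt_iff, h]
    · simp [Prod.Lex.lt_iff, h]
    · have h1 : ¬ k1 a < k1 b := not_lt_of_gt h
      simp only [Prod.Lex.lt_iff, ofLex_toLex, h1, h.ne', false_and, or_self, decide_false,
        Bool.false_or]
      simp [h]
  simp only [PySem.List.sorted2, PySem.List.sorted, Bool.false_eq_true, if_false]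
  rw [hC]

-- Any strictly lex-increasing rearrangement of xs is sorted2 xs k1 k2.
theorem sorted2_eq_of_perm_of_pairwise_lt {α κ₁ κ₂ : Type} [LinearOrder κ₁] [LinearOrder κ₂]
    (xs ys : List α) (k1 : α → κ₁) (k2 : α → κ₂)
    (hperm : ys.Perm xs)
    (hpw : ys.Pairwise (fun a b => k1 a < k1 b ∨ (k1 a = k1 b ∧ k2 a < k2 b))) :
    PySem.List.sorted2 xs k1 k2 = ys := by
  rw [sorted2_eq_sorted_toLex]
  refine PySem.List.sorted_eq_of_perm_of_pairwise_lt xs ys _ hperm ?_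
  refine hpw.imp ?_
  intro a b h
  rcases h with h | ⟨h1, h2⟩
  · exact Prod.Lex.lt_iff.mpr (Or.inl h)
  · exact Prod.Lex.lt_iff.mpr (Or.inr ⟨h1, h2⟩)

def pvRank : PySem.Dict String Int :=
  (PySem.List.enumerate ARGS_NAME_FROM_FILENAME_ORDERED).foldl
    (fun r p => r.insert p.2 p.1) PySem.Dict.empty

theorem pvRank_keys : pvRank.keys = ARGS_NAME_FROM_FILENAME_ORDERED := by decide

theorem pvRank_size : pvRank.size = 12 := by decide

theorem pvORDERED_nodup : ARGS_NAME_FROM_FILENAME_ORDERED.Nodup := by decide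

theorem pvRank_pairwise :
    ARGS_NAME_FROM_FILENAME_ORDERED.Pairwise
      (fun a b => pvRank.getD a 12 < pvRank.getD b 12) := by decide

theorem pvRank_lt_of_mem {a : String} (h : a ∈ ARGS_NAME_FROM_FILENAME_ORDERED) :
    pvRank.getD a 12 < 12 := by
  fin_cases h <;> decide

theorem pvRank_of_not_mem {a : String} (h : a ∉ ARGS_NAME_FROM_FILENAME_ORDERED) :
    pvRank.getD a 12 = 12 := by
  refine PySem.Dict.getD_of_not_contains _ _ ?_
  by_contra hc
  have : pvRank.contains a = true := by
    cases hcc : pvRank.contains a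
    · exact absurd hcc hc
    · rfl
  exact h (pvRank_keys ▸ (PySem.Dict.contains_iff_mem_keys _ _).mp this)

-- The ordered part followed by the not-in-list part of the sorted keys IS the sorted2 order.
theorem sorted2_keys_eq (d : PySem.Dict String String) (hnd : d.keys.Nodup) :
    PySem.List.sorted2 d.keys (fun k => pvRank.getD k 12) (fun k => k) =
      ARGS_NAME_FROM_FILENAME_ORDERED.filter (fun k => d.contains k) ++
        (PySem.List.sorted d.keys (fun k => k)).filter
          (fun k => !ARGS_NAME_FROM_FILENAME_ORDERED.contains k) := by
  have hSperm := PySem.List.sorted_perm d.keys (fun k => k) false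
  have hSnd : (PySem.List.sorted d.keys (fun k => k)).Nodup := hSperm.nodup_iff.mpr hnd
  refine sorted2_eq_of_perm_of_pairwise_lt _ _ _ _ ?_ ?_
  · -- permutation with d.keys
    have h1 : (ARGS_NAME_FROM_FILENAME_ORDERED.filter (fun k => d.contains k)).Perm
        (d.keys.filter (fun k => ARGS_NAME_FROM_FILENAME_ORDERED.contains k)) := by
      refine (List.perm_ext_iff_of_nodup (pvORDERED_nodup.filter _) (hnd.filter _)).mpr ?_
      intro a
      simp only [List.mem_filter, List.contains_iff_mem]
      constructor
      · rintro ⟨ha, hc⟩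
        exact ⟨(PySem.Dict.contains_iff_mem_keys _ _).mp hc, by simpa using ha⟩
      · rintro ⟨ha, hc⟩
        exact ⟨by simpa using hc, (PySem.Dict.contains_iff_mem_keys _ _).mpr ha⟩
    have h2 : ((PySem.List.sorted d.keys (fun k => k)).filter
        (fun k => !ARGS_NAME_FROM_FILENAME_ORDERED.contains k)).Perm
        (d.keys.filter (fun k => !ARGS_NAME_FROM_FILENAME_ORDERED.contains k)) :=
      hSperm.filter _
    exact (h1.append h2).trans (List.filter_append_perm _ _)
  · -- pairwise strict lex order
    rw [List.pairwise_append]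
    refine ⟨?_, ?_, ?_⟩
    · -- within the ordered part: strictly increasing rank
      have hsub : (ARGS_NAME_FROM_FILENAME_ORDERED.filter (fun k => d.contains k)).Sublist
          ARGS_NAME_FROM_FILENAME_ORDERED := List.filter_sublist
      exact (List.Pairwise.sublist hsub pvRank_pairwise).imp (fun h => Or.inl h)
    · -- within the rest: ranklessness and strictly increasing keys
      have hle : (PySem.List.sorted d.keys (fun k => k)).Pairwise
          (fun a b : String => a ≤ b) := by
        simpa using PySem.List.sorted_pairwise d.keys (fun k => k)
      have hlt : (PySem.List.sorted d.keys (fun k => k)).Pairwise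
          (fun a b : String => a < b) := by
        refine (hle.and hSnd).imp ?_
        intro a b ⟨h1, h2⟩
        exact lt_of_le_of_ne h1 h2
      have hsub2 : ((PySem.List.sorted d.keys (fun k => k)).filter
          (fun k => !ARGS_NAME_FROM_FILENAME_ORDERED.contains k)).Sublist
          (PySem.List.sorted d.keys (fun k => k)) := List.filter_sublist
      have hflt := List.Pairwise.sublist hsub2 hlt
      refine List.Pairwise.imp_of_mem ?_ hflt
      intro a b ha hb hab
      have ha' : a ∉ ARGS_NAME_FROM_FILENAME_ORDERED := by
        have := (List.mem_filter.mp ha).2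
        simpa [List.contains_iff_mem] using this
      have hb' : b ∉ ARGS_NAME_FROM_FILENAME_ORDERED := by
        have := (List.mem_filter.mp hb).2
        simpa [List.contains_iff_mem] using this
      exact Or.inr ⟨by rw [pvRank_of_not_mem ha', pvRank_of_not_mem hb'], hab⟩
    · -- across: every ordered name ranks below every other name
      intro a ha b hb
      have ha' : a ∈ ARGS_NAME_FROM_FILENAME_ORDERED := (List.mem_filter.mp ha).1
      have hb' : b ∉ ARGS_NAME_FROM_FILENAME_ORDERED := by
        have := (List.mem_filter.mp hb).2
        simpa [List.contains_iff_mem] using this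
      exact Or.inl (by rw [pvRank_of_not_mem hb']; exact pvRank_lt_of_mem ha')

-- ===== VERDICT (by name: the statement is the Claim_ definition above) =====
theorem get_canonicalize_key_from_spec : Claim_equal_get_canonicalize_key_from := by
  intro args result_name _
  unfold Spec_get_canonicalize_key_from
  simp only [get_canonicalize_key_from, get_canonicalize_key_from_alt]
  have hrank : (List.foldl (fun (r : PySem.Dict String Int) (p : Int × String) => r.insert p.2 p.1)
      PySem.Dict.empty (PySem.List.enumerate ARGS_NAME_FROM_FILENAME_ORDERED)) = pvRank := rfl
  rw [hrank]
  have hn : ((pvRank.size : Nat) : Int) = 12 := by rw [pvRank_size]; rfl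
  rw [hn]
  rw [PySem.List.foldl_append_if
      (fun argname => (PySem.Dict.ofList args).contains argname)
      (fun argname => argname ++ "." ++ (PySem.Dict.ofList args).getD argname "")]
  rw [PySem.List.foldl_append_if
      (fun argname => !ARGS_NAME_FROM_FILENAME_ORDERED.contains argname)
      (fun argname => argname ++ "." ++ (PySem.Dict.ofList args).getD argname "")]
  rw [sorted2_keys_eq (PySem.Dict.ofList args) (PySem.Dict.nodup_keys_ofList args)]
  simp [List.map_append]
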